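-- pv_equiv track=rewrite | github.com/idan10000/University | Intro. comp/hw2/hw2_322522111.py | check_goldbach_stats
-- ===== SOURCE A (Python) =====
-- def check_goldbach_for_num_stats(n, primes_set):
--     counter = 0
--     for num in primes_set:
--         if (int(n) - num) in primes_set:
--             if (int(n) - num) == num:
--                 counter += 2
--             else:
--                 counter += 1
--     return counter // 2  # it find every pair twice, so we return half of it (5 + 3 or 3 + 5 which are the same pair)
--
-- def check_goldbach_stats(limit, primes_set):
--     dict = {}
--     for num in range(4, int(limit) + 1, 2):
--         curPlace = check_goldbach_for_num_stats(num, primes_set)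
--         if curPlace not in dict:
--             dict[curPlace] = 0
--         dict[curPlace] += 1
--     return dict
-- ===== SOURCE B (Python) =====
-- def _lower(ks, x):
--     lo, hi = 0, len(ks)
--     while lo < hi:
--         mid = (lo + hi) // 2
--         if ks[mid] < x:
--             lo = mid + 1
--         else:
--             hi = mid
--     return lo
--
-- def check_goldbach_stats(limit, primes_set):
--     ks = sorted(set(primes_set))
--     L = int(limit)
--     total = {}
--     for p in primes_set:
--         for q in ks[_lower(ks, 4 - p):_lower(ks, L - p + 1)]:
--             total[p + q] = total.get(p + q, 0) + (2 if p == q else 1)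
--     hist = {}
--     for n in range(4, L + 1, 2):
--         c = total.get(n, 0) // 2
--         hist[c] = hist.get(c, 0) + 1
--     return hist
-- ===== Notes on version B (the rewrite author's own statement) =====
-- stated objective: faster
-- what changed: Instead of rescanning primes_set for every even n, B sorts the distinct keys once and, per element p, tallies only the partner keys in the binary-searched window [4-p, limit-p] into a sum-indexed dict, then reads each even n's Goldbach count off that dict in O(1).
import Mathlib
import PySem

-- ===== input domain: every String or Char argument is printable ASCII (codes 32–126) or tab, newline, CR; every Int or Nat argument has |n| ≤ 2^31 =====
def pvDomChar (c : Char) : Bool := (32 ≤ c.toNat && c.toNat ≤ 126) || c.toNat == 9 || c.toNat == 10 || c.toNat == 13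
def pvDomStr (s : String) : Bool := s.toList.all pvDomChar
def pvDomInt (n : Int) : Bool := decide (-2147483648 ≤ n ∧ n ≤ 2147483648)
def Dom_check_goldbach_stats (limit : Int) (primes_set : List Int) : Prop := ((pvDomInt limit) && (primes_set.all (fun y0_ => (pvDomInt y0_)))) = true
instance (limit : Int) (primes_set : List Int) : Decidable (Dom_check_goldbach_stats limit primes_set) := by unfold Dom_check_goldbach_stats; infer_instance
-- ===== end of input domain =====

-- B sorts the distinct keys once and tallies only the pair sums that can land in [4, limit]
-- (binary-searched window per element) into one dict, then reads each even n's count off it;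
-- A rescans primes_set for every even n (objective: faster, measured).


-- ===== PORT A =====
def check_goldbach_for_num_stats (n : Int) (primes_set : List Int) : Int :=
  let counter : Int := primes_set.foldl
    (fun counter num =>
      if (n - num) ∈ primes_set then
        (if (n - num) = num then counter + 2 else counter + 1)
      else counter) 0
  PySem.Int.floordiv counter 2

def check_goldbach_stats (limit : Int) (primes_set : List Int) : List (Int × Int) :=
  let d : PySem.Dict Int Int := (PySem.List.pyRange 4 (limit + 1) 2).foldl
    (fun d num =>
      let curPlace := check_goldbach_for_num_stats num primes_set
      let d := if !(d.contains curPlace) then d.insert curPlace 0 else d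
      d.insert curPlace (d.getD curPlace 0 + 1)) PySem.Dict.empty
  d.items

-- ===== PORT B =====
-- Source B's hand-written _lower (binary search, first index with ks[i] >= x), as its while loop;
-- the fuel argument only makes the loop structurally recursive (the interval shrinks each step)
def pvLowerAux (ks : List Int) (x : Int) : Nat → Int → Int → Int
  | 0, lo, _ => lo
  | fuel + 1, lo, hi =>
    if lo < hi then
      let mid := PySem.Int.floordiv (lo + hi) 2
      if PySem.List.pyGetD ks mid 0 < x then pvLowerAux ks x fuel (mid + 1) hi
      else pvLowerAux ks x fuel lo mid
    else lo

def pvLower (ks : List Int) (x : Int) : Int := pvLowerAux ks x (ks.length + 1) 0 (ks.length : Int)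

def check_goldbach_stats_alt (limit : Int) (primes_set : List Int) : List (Int × Int) :=
  let ks := PySem.List.sorted (PySem.Set.ofList primes_set) (fun y => y) false
  let total : PySem.Dict Int Int := primes_set.foldl
    (fun total p =>
      (PySem.List.slice ks (some (pvLower ks (4 - p))) (some (pvLower ks (limit - p + 1)))).foldl
        (fun total q => total.insert (p + q) (total.getD (p + q) 0 + (if p = q then 2 else 1))) total)
    PySem.Dict.empty
  let hist : PySem.Dict Int Int := (PySem.List.pyRange 4 (limit + 1) 2).foldl
    (fun hist n =>
      let c := PySem.Int.floordiv (total.getD n 0) 2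
      hist.insert c (hist.getD c 0 + 1)) PySem.Dict.empty
  hist.items

-- ===== PRECONDITION & SPEC =====
def Spec_check_goldbach_stats (limit : Int) (primes_set : List Int) (out : List (Int × Int)) : Prop := out = check_goldbach_stats_alt limit primes_set
instance (limit : Int) (primes_set : List Int) (out : List (Int × Int)) : Decidable (Spec_check_goldbach_stats limit primes_set out) := by unfold Spec_check_goldbach_stats; infer_instance

-- ===== CLAIM (what is proved, stated in full; the proofs are below) =====
def Claim_equal_check_goldbach_stats : Prop := ∀ (limit : Int) (primes_set : List Int), Dom_check_goldbach_stats limit primes_set → Spec_check_goldbach_stats limit primes_set (check_goldbach_stats limit primes_set)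

-- ===== LEMMAS AND PROOFS =====

-- binary-search invariant: pvLowerAux returns the first index whose element is ≥ x
theorem pvLowerAux_spec (ks : List Int) (x : Int) (fuel : Nat) (lo hi : Int)
    (hmono : ∀ (i j : Nat) (hij : i < j) (hj : j < ks.length), ks[i]'(by omega) < ks[j]) :
    (hi - lo).toNat ≤ fuel → 0 ≤ lo → lo ≤ hi → hi ≤ (ks.length : Int) →
    (∀ i : Nat, (i : Int) < lo → ∀ hil : i < ks.length, ks[i] < x) →
    (∀ i : Nat, hi ≤ (i : Int) → ∀ hil : i < ks.length, x ≤ ks[i]) →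
    (lo ≤ pvLowerAux ks x fuel lo hi ∧ pvLowerAux ks x fuel lo hi ≤ hi ∧
      (∀ i : Nat, (i : Int) < pvLowerAux ks x fuel lo hi → ∀ hil : i < ks.length, ks[i] < x) ∧
      (∀ i : Nat, pvLowerAux ks x fuel lo hi ≤ (i : Int) → ∀ hil : i < ks.length, x ≤ ks[i])) := by
  induction fuel generalizing lo hi with
  | zero =>
    intro hfuel h0 hlh hhi hbelow habove
    have : lo = hi := by omega
    subst this
    exact ⟨le_refl _, le_refl _, hbelow, habove⟩
  | succ fuel ih =>
    intro hfuel h0 hlh hhi hbelow habove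
    by_cases hlt : lo < hi
    · rw [pvLowerAux, if_pos hlt]
      have hmid : lo ≤ PySem.Int.floordiv (lo + hi) 2 ∧ PySem.Int.floordiv (lo + hi) 2 < hi := by
        rw [PySem.Int.floordiv_eq_ediv_of_pos (by omega)]; omega
      set mid := PySem.Int.floordiv (lo + hi) 2 with hmideq
      have hmlt : mid.toNat < ks.length := by omega
      have hget : PySem.List.pyGetD ks mid 0 = ks[mid.toNat] :=
        PySem.List.pyGetD_eq_getElem ks 0 (by omega) (by omega : mid < (ks.length : Int))
      by_cases hcmp : PySem.List.pyGetD ks mid 0 < x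
      · rw [if_pos hcmp]
        have hksmid : ks[mid.toNat] < x := hget ▸ hcmp
        have hbelow' : ∀ i : Nat, (i : Int) < mid + 1 → ∀ hil : i < ks.length, ks[i] < x := by
          intro i hi hil
          by_cases he : (i : Int) = mid
          · have : i = mid.toNat := by omega
            subst this; exact hksmid
          · exact lt_trans (hmono i mid.toNat (by omega) hmlt) hksmid
        obtain ⟨a1, a2, a3, a4⟩ := ih (mid + 1) hi (by omega) (by omega) (by omega) hhi hbelow' habove
        exact ⟨by omega, a2, a3, a4⟩
      · rw [if_neg hcmp]
        have hksmid : x ≤ ks[mid.toNat] := by rw [hget] at hcmp; omega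
        have habove' : ∀ i : Nat, mid ≤ (i : Int) → ∀ hil : i < ks.length, x ≤ ks[i] := by
          intro i hi hil
          by_cases he : (i : Int) = mid
          · have : i = mid.toNat := by omega
            subst this; exact hksmid
          · exact le_trans hksmid (le_of_lt (hmono mid.toNat i (by omega) hil))
        obtain ⟨a1, a2, a3, a4⟩ := ih lo mid (by omega) h0 (by omega) (by omega) hbelow habove'
        exact ⟨a1, by omega, a3, a4⟩
    · rw [pvLowerAux, if_neg hlt]
      have : lo = hi := by omega
      subst this
      exact ⟨le_refl _, le_refl _, hbelow, habove⟩

theorem pvLower_spec (ks : List Int) (x : Int)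
    (hmono : ∀ (i j : Nat) (hij : i < j) (hj : j < ks.length), ks[i]'(by omega) < ks[j]) :
    0 ≤ pvLower ks x ∧ pvLower ks x ≤ (ks.length : Int) ∧
      (∀ i : Nat, (i : Int) < pvLower ks x → ∀ hil : i < ks.length, ks[i] < x) ∧
      (∀ i : Nat, pvLower ks x ≤ (i : Int) → ∀ hil : i < ks.length, x ≤ ks[i]) := by
  have h := pvLowerAux_spec ks x (ks.length + 1) 0 (ks.length : Int) hmono (by omega)
    (le_refl 0) (by positivity) (le_refl _) (by intro i hi _; omega) (by intro i hi hil; omega)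
  exact ⟨h.1, h.2.1, h.2.2.1, h.2.2.2⟩

-- the slice ks[_lower(ks,a) : _lower(ks,b)] of a strictly increasing ks holds exactly the q ∈ ks with a ≤ q < b
theorem mem_window (ks : List Int) (hpair : ks.Pairwise (· < ·)) (a b q : Int) :
    q ∈ PySem.List.slice ks (some (pvLower ks a)) (some (pvLower ks b)) ↔
      (q ∈ ks ∧ a ≤ q ∧ q < b) := by
  have hmono : ∀ (i j : Nat) (hij : i < j) (hj : j < ks.length), ks[i]'(by omega) < ks[j] := by
    intro i j hij hj
    exact List.pairwise_iff_getElem.mp hpair i j (by omega) hj hij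
  obtain ⟨s10, s11, s12, s13⟩ := pvLower_spec ks a hmono
  obtain ⟨s20, s21, s22, s23⟩ := pvLower_spec ks b hmono
  rw [PySem.List.slice_toNat _ s10 s20]
  constructor
  · intro hq
    obtain ⟨j, hj, hjq⟩ := List.mem_iff_getElem.mp hq
    have hTlen := List.length_take (i := (pvLower ks b).toNat - (pvLower ks a).toNat)
      (l := ks.drop (pvLower ks a).toNat)
    have hDlen := List.length_drop (i := (pvLower ks a).toNat) (l := ks)
    have hidx : (pvLower ks a).toNat + j < ks.length := by omega
    rw [List.getElem_take, List.getElem_drop] at hjq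
    refine ⟨hjq ▸ List.getElem_mem hidx, ?_, ?_⟩
    · have := s13 ((pvLower ks a).toNat + j) (by omega) hidx
      exact le_of_le_of_eq this hjq
    · have := s22 ((pvLower ks a).toNat + j) (by omega) hidx
      exact lt_of_eq_of_lt hjq.symm this
  · rintro ⟨hqks, hqa, hqb⟩
    obtain ⟨i, hi, hiq⟩ := List.mem_iff_getElem.mp hqks
    have hge : pvLower ks a ≤ (i : Int) := by
      by_contra hc
      have := s12 i (by omega) hi
      omega
    have hlt2 : (i : Int) < pvLower ks b := by
      by_contra hc
      have := s23 i (by omega) hi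
      omega
    apply List.mem_iff_getElem.mpr
    refine ⟨i - (pvLower ks a).toNat, ?_, ?_⟩
    · simp only [List.length_take, List.length_drop]
      omega
    · rw [List.getElem_take, List.getElem_drop]
      have hix : (pvLower ks a).toNat + (i - (pvLower ks a).toNat) = i := by omega
      simp only [hix]
      exact hiq

theorem window_nodup (ks : List Int) (hnd : ks.Nodup) (a b : Int)
    (ha : 0 ≤ a) (hb : 0 ≤ b) :
    (PySem.List.slice ks (some a) (some b)).Nodup := by
  rw [PySem.List.slice_toNat _ ha hb]
  exact ((List.take_sublist _ _).trans (List.drop_sublist _ _)).nodup hnd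

-- inner tally loop touches key n only at q = n - p
theorem tally_getD_of_ne (l : List Int) (p n : Int) (d : PySem.Dict Int Int)
    (h : ∀ q ∈ l, p + q ≠ n) :
    (l.foldl (fun total q => total.insert (p + q) (total.getD (p + q) 0 + (if p = q then 2 else 1))) d).getD n 0
      = d.getD n 0 := by
  induction l generalizing d with
  | nil => rfl
  | cons q t ih =>
    simp only [List.foldl_cons]
    rw [ih _ (fun x hx => h x (List.mem_cons_of_mem _ hx))]
    rw [PySem.Dict.getD_insert_of_ne]
    exact fun he => h q (List.mem_cons_self) (he ▸ rfl)

theorem tally_getD (l : List Int) (p n : Int) (d : PySem.Dict Int Int) (hnd : l.Nodup) :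
    (l.foldl (fun total q => total.insert (p + q) (total.getD (p + q) 0 + (if p = q then 2 else 1))) d).getD n 0
      = d.getD n 0 + (if (n - p) ∈ l then (if p = n - p then 2 else 1) else 0) := by
  induction l generalizing d with
  | nil => simp
  | cons q t ih =>
    rcases List.nodup_cons.mp hnd with ⟨hq, hndt⟩
    simp only [List.foldl_cons]
    by_cases hqe : q = n - p
    · subst hqe
      have hpq : p + (n - p) = n := by ring
      rw [tally_getD_of_ne t p n _ ?_]
      · rw [hpq, PySem.Dict.getD_insert_self]
        simp [List.mem_cons]
      · intro x hx hsum
        have hx' : x = n - p := by omega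
        exact hq (hx' ▸ hx)
    · have hne : n ≠ p + q := by omega
      rw [ih _ hndt, PySem.Dict.getD_insert_of_ne _ _ _ hne]
      have hsplit : ((n - p) ∈ q :: t) ↔ ((n - p) ∈ t) :=
        List.mem_cons.trans (or_iff_right (fun h => hqe h.symm))
      simp only [hsplit]

theorem total_getD_aux (l : List Int) (limit n : Int)
    (hn4 : 4 ≤ n) (hnL : n ≤ limit) (m : List Int) (d : PySem.Dict Int Int) :
    ((m.foldl (fun total p =>
        (PySem.List.slice (PySem.List.sorted (PySem.Set.ofList l) (fun y => y) false)
            (some (pvLower (PySem.List.sorted (PySem.Set.ofList l) (fun y => y) false) (4 - p)))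
            (some (pvLower (PySem.List.sorted (PySem.Set.ofList l) (fun y => y) false) (limit - p + 1)))).foldl
          (fun total q => total.insert (p + q) (total.getD (p + q) 0 + (if p = q then 2 else 1))) total) d)).getD n 0
      = d.getD n 0 + (m.map (fun p => if (n - p) ∈ l then (if p = n - p then 2 else 1) else 0)).sum := by
  have hpair : (PySem.List.sorted (PySem.Set.ofList l) (fun y => y) false).Pairwise (· < ·) :=
    PySem.List.sorted_ofList_pairwise_lt l
  have hnd : (PySem.List.sorted (PySem.Set.ofList l) (fun y => y) false).Nodup :=
    hpair.imp (fun h => ne_of_lt h)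
  have hmono : ∀ (i j : Nat) (hij : i < j)
      (hj : j < (PySem.List.sorted (PySem.Set.ofList l) (fun y => y) false).length),
      (PySem.List.sorted (PySem.Set.ofList l) (fun y => y) false)[i]'(by omega)
        < (PySem.List.sorted (PySem.Set.ofList l) (fun y => y) false)[j] := by
    intro i j hij hj
    exact List.pairwise_iff_getElem.mp hpair i j (by omega) hj hij
  have hksmem : ∀ z : Int, z ∈ PySem.List.sorted (PySem.Set.ofList l) (fun y => y) false ↔ z ∈ l := by
    intro z
    rw [PySem.List.mem_sorted, PySem.Set.mem_ofList]
  induction m generalizing d with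
  | nil => simp
  | cons p t ih =>
    simp only [List.foldl_cons, List.map_cons, List.sum_cons]
    rw [ih, tally_getD _ _ _ _ (window_nodup _ hnd _ _
      (pvLower_spec _ (4 - p) hmono).1 (pvLower_spec _ (limit - p + 1) hmono).1)]
    have hw : ((n - p) ∈ PySem.List.slice (PySem.List.sorted (PySem.Set.ofList l) (fun y => y) false)
          (some (pvLower (PySem.List.sorted (PySem.Set.ofList l) (fun y => y) false) (4 - p)))
          (some (pvLower (PySem.List.sorted (PySem.Set.ofList l) (fun y => y) false) (limit - p + 1))))
        ↔ ((n - p) ∈ l) := by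
      rw [mem_window _ hpair]
      constructor
      · rintro ⟨h1, _, _⟩
        exact (hksmem _).mp h1
      · intro h1
        exact ⟨(hksmem _).mpr h1, by omega, by omega⟩
    simp only [hw]
    ring

-- outer tally loop: for 4 ≤ n ≤ limit the window makes each element's contribution the plain membership test
theorem total_getD (l : List Int) (limit n : Int) (d : PySem.Dict Int Int)
    (hn4 : 4 ≤ n) (hnL : n ≤ limit) :
    ((l.foldl (fun total p =>
        (PySem.List.slice (PySem.List.sorted (PySem.Set.ofList l) (fun y => y) false)
            (some (pvLower (PySem.List.sorted (PySem.Set.ofList l) (fun y => y) false) (4 - p)))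
            (some (pvLower (PySem.List.sorted (PySem.Set.ofList l) (fun y => y) false) (limit - p + 1)))).foldl
          (fun total q => total.insert (p + q) (total.getD (p + q) 0 + (if p = q then 2 else 1))) total) d)).getD n 0
      = d.getD n 0 + (l.map (fun p => if (n - p) ∈ l then (if p = n - p then 2 else 1) else 0)).sum :=
  total_getD_aux l limit n hn4 hnL l d

theorem counterA_fold (l full : List Int) (n a : Int) :
    l.foldl (fun counter num =>
      if (n - num) ∈ full then
        (if (n - num) = num then counter + 2 else counter + 1)
      else counter) a
      = a + (l.map (fun num => if (n - num) ∈ full then (if (n - num) = num then 2 else 1) else 0)).sum := by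
  induction l generalizing a with
  | nil => simp
  | cons p t ih =>
    simp only [List.foldl_cons, List.map_cons, List.sum_cons]
    rw [ih]
    split_ifs <;> ring

-- the two per-element contributions agree (only the equality test is flipped)
theorem contrib_eq (full : List Int) (n p : Int) :
    (if (n - p) ∈ full then (if p = n - p then 2 else 1) else 0 : Int)
      = (if (n - p) ∈ full then (if (n - p) = p then 2 else 1) else 0) := by
  by_cases h : (n - p) ∈ full
  · rw [if_pos h, if_pos h]
    by_cases he : p = n - p
    · rw [if_pos he, if_pos he.symm]
    · rw [if_neg he, if_neg (fun hh => he hh.symm)]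
  · rw [if_neg h, if_neg h]

-- per-n: A's count equals B's tally read-off, for n in the histogram range
theorem count_eq (primes_set : List Int) (limit n : Int) (hn4 : 4 ≤ n) (hnL : n ≤ limit) :
    check_goldbach_for_num_stats n primes_set
      = PySem.Int.floordiv
          ((primes_set.foldl (fun total p =>
              (PySem.List.slice (PySem.List.sorted (PySem.Set.ofList primes_set) (fun y => y) false)
                  (some (pvLower (PySem.List.sorted (PySem.Set.ofList primes_set) (fun y => y) false) (4 - p)))
                  (some (pvLower (PySem.List.sorted (PySem.Set.ofList primes_set) (fun y => y) false) (limit - p + 1)))).foldl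
                (fun total q => total.insert (p + q) (total.getD (p + q) 0 + (if p = q then 2 else 1))) total)
            PySem.Dict.empty).getD n 0) 2 := by
  unfold check_goldbach_for_num_stats
  rw [total_getD _ _ _ _ hn4 hnL, counterA_fold]
  simp only [PySem.Dict.getD_empty, zero_add]
  congr 1
  exact congrArg List.sum (List.map_congr_left (fun p _ => (contrib_eq primes_set n p).symm))

-- Python's "if c not in d: d[c] = 0; d[c] += 1" is a single counting insert
theorem hist_step_eq (d : PySem.Dict Int Int) (c : Int) :
    (if !(d.contains c) then d.insert c 0 else d).insert c
        ((if !(d.contains c) then d.insert c 0 else d).getD c 0 + 1)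
      = d.insert c (d.getD c 0 + 1) := by
  by_cases h : d.contains c
  · simp [h]
  · have h' : d.contains c = false := by simpa using h
    rw [PySem.Dict.getD_of_not_contains d 0 h']
    simp [h', PySem.Dict.insert_insert_self, PySem.Dict.getD_insert_self]

-- ===== VERDICT (by name: the statement is the Claim_ definition above) =====
theorem check_goldbach_stats_spec : Claim_equal_check_goldbach_stats := by
  intro limit primes_set _
  unfold Spec_check_goldbach_stats check_goldbach_stats check_goldbach_stats_alt
  dsimp only
  congr 1
  apply PySem.List.foldl_congr_mem
  intro d num hmem
  have hb : (4 : Int) ≤ num ∧ num < limit + 1 := by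
    have := (PySem.List.mem_pyRange_iff_of_pos (by omega : (0:Int) < 2) num).mp hmem
    exact ⟨this.1, this.2.1⟩
  rw [hist_step_eq, count_eq primes_set limit num hb.1 (by omega)]
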